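-- pv_equiv track=rewrite | github.com/aralfaruqi/alteraproject | Data Structure/Problem Siang/5 - Initial Group Descending.py | initialGroupingDescending
-- ===== SOURCE A (Python) =====
-- def initialGroupingDescending(studentsArr) :
--     huruf_awal = []
--     for student in studentsArr:
--         huruf_awal.append(student[0])
--
--     set_huruf_awal = set(huruf_awal)
--     list_huruf_awal = list(set_huruf_awal)
--     list_akhir = []
--
--     swapped = True
--     while swapped:
--         swapped = False
--         maxIter = len(list_huruf_awal)-1
--         for i in range(maxIter):
--             val1 = list_huruf_awal[i]
--             val2 = list_huruf_awal[i+1]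
--             if val1<val2:
--                 list_huruf_awal[i] = val2
--                 list_huruf_awal[i+1] = val1
--                 swapped = True
--
--     for huruf in list_huruf_awal:
--         lst = []
--         lst.append(huruf)
--         for student in studentsArr:
--             if huruf == student[0]:
--                 lst.append(student)
--
--         list_akhir.append(lst)
--
--     return list_akhir
-- ===== SOURCE B (Python) =====
-- def initialGroupingDescending(studentsArr):
--     groups = {}
--     for s in studentsArr:
--         groups.setdefault(s[0], []).append(s)
--     return [[k] + groups[k] for k in sorted(groups, reverse=True)]
-- ===== Notes on version B (the rewrite author's own statement) =====
-- stated objective: faster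
-- what changed: replaces the first-letter collection + bubble sort + per-letter rescans of the whole list with a one-pass dict grouping followed by sorted(keys, reverse=True)
import Mathlib
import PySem

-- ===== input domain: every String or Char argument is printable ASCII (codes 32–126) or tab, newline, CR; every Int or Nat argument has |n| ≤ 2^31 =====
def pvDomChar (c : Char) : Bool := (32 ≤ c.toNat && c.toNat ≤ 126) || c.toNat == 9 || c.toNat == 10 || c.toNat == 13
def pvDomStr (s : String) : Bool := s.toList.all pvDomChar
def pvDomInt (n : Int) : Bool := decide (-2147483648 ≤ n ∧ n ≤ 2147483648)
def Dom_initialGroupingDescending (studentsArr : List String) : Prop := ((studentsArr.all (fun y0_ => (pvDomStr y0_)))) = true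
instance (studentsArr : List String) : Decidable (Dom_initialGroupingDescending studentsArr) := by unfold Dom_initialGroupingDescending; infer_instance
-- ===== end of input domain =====

-- ===== PORT A =====
-- B replaces A's bubble sort + per-letter rescans with one-pass dict grouping + sorted(keys, reverse=True).
-- Equivalence is about the return value; neither program mutates its argument.

-- s[0] (IndexError on "", excluded by Pre_; the default is never read under Pre_)
def pvFirst (s : String) : Char := (PySem.Str.pyGet? s 0).getD ' '

-- number of adjacent-transposable (ascending) pairs: termination measure for A's while-swapped loop
def pvInv : List Char → Nat
  | [] => 0
  | a :: t => t.countP (fun b => a < b) + pvInv t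

-- one execution of A's inner 'for i in range(len-1)' pass of in-place adjacent swaps,
-- as the structural recursion over the same list; returns (list after the pass, swapped)
def pvPass : List Char → List Char × Bool
  | [] => ([], false)
  | [a] => ([a], false)
  | a :: b :: t =>
    if a < b then
      let r := pvPass (a :: t)
      (b :: r.1, true)
    else
      let r := pvPass (b :: t)
      (a :: r.1, r.2)
termination_by xs => xs.length

-- the two facts pvBubble's termination proof cites (they must precede the port)
theorem pvPass_perm : ∀ xs : List Char, (pvPass xs).1.Perm xs
  | [] => by simp [pvPass]
  | [a] => by simp [pvPass]
  | a :: b :: t => by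
    by_cases h : a < b
    · simpa [pvPass, h] using ((pvPass_perm (a :: t)).cons b).trans (List.Perm.swap a b t)
    · simpa [pvPass, h] using (pvPass_perm (b :: t)).cons a
termination_by xs => xs.length

theorem pvPass_inv : ∀ xs : List Char,
    pvInv (pvPass xs).1 + (if (pvPass xs).2 then 1 else 0) ≤ pvInv xs
  | [] => by simp [pvPass, pvInv]
  | [a] => by simp [pvPass, pvInv]
  | a :: b :: t => by
    by_cases h : a < b
    · have ih := pvPass_inv (a :: t)
      have hc := (pvPass_perm (a :: t)).countP_eq (fun x => decide (b < x))
      have hba : (decide (b < a)) = false := by simp [not_lt.mpr h.le]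
      simp only [pvInv] at ih
      simp only [pvPass, h, if_true, pvInv]
      rw [hc]
      simp [h, hba]
      cases hs : (pvPass (a :: t)).2 <;> simp [hs] at ih <;> omega
    · have ih := pvPass_inv (b :: t)
      have hc := (pvPass_perm (b :: t)).countP_eq (fun x => decide (a < x))
      have hab : (decide (a < b)) = false := by simp [h]
      simp only [pvInv] at ih
      simp only [pvPass, h, if_false, pvInv]
      rw [hc]
      simp [hab]
      omega
termination_by xs => xs.length

theorem pvPass_dec (xs : List Char) (h : (pvPass xs).2 = true) :
    pvInv (pvPass xs).1 < pvInv xs := by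
  have := pvPass_inv xs
  simp [h] at this
  omega

-- A's 'while swapped:' loop
def pvBubble (xs : List Char) : List Char :=
  let r := pvPass xs
  if _h : r.2 = true then pvBubble r.1 else r.1
termination_by pvInv xs
decreasing_by exact pvPass_dec xs (by assumption)

def initialGroupingDescending (studentsArr : List String) : List (List String) :=
  -- huruf_awal: first letters, in order
  let huruf_awal : List Char := studentsArr.foldl (fun acc s => acc ++ [pvFirst s]) []
  -- list(set(huruf_awal)); the set's hash order is irrelevant: the bubble sort below fully orders it
  let list_huruf_awal : List Char := PySem.Set.ofList huruf_awal
  -- while swapped: one pass of adjacent swaps, repeated until no swap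
  let sorted_letters : List Char := pvBubble list_huruf_awal
  -- for huruf in …: lst = [huruf]; for student in …: append matches; list_akhir.append(lst)
  sorted_letters.foldl
    (fun acc h =>
      acc ++ [studentsArr.foldl
        (fun lst s => if h == pvFirst s then lst ++ [s] else lst) [String.ofList [h]]]) []

-- ===== PORT B =====
def initialGroupingDescending_alt (studentsArr : List String) : List (List String) :=
  let groups : PySem.Dict Char (List String) :=
    studentsArr.foldl (fun d s => d.modify (pvFirst s) [] (fun g => g ++ [s])) PySem.Dict.empty
  (PySem.List.sorted groups.keys (fun x => x) true).map
    (fun k => [String.ofList [k]] ++ groups.getD k [])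

-- ===== PRECONDITION & SPEC =====
-- Pre_ excludes only inputs containing an empty string, on which Python A raises IndexError (student[0])
def Pre_initialGroupingDescending (studentsArr : List String) : Prop :=
  ∀ s ∈ studentsArr, s ≠ ""
instance (studentsArr : List String) : Decidable (Pre_initialGroupingDescending studentsArr) := by
  unfold Pre_initialGroupingDescending; infer_instance
def pvWitness_initialGroupingDescending : List String := ["bob", "alice", "amy", "Carol"]
def Spec_initialGroupingDescending (studentsArr : List String) (out : List (List String)) : Prop := out = initialGroupingDescending_alt studentsArr
instance (studentsArr : List String) (out : List (List String)) : Decidable (Spec_initialGroupingDescending studentsArr out) := by unfold Spec_initialGroupingDescending; infer_instance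

-- ===== CLAIM (what is proved, stated in full; the proofs are below) =====
def Claim_equal_initialGroupingDescending : Prop := ∀ (studentsArr : List String), Dom_initialGroupingDescending studentsArr → Pre_initialGroupingDescending studentsArr → Spec_initialGroupingDescending studentsArr (initialGroupingDescending studentsArr)

-- ===== LEMMAS AND PROOFS =====

theorem pvPass_id : ∀ xs : List Char, (pvPass xs).2 = false → (pvPass xs).1 = xs
  | [] => by simp [pvPass]
  | [a] => by simp [pvPass]
  | a :: b :: t => by
    by_cases h : a < b
    · simp [pvPass, h]
    · intro hsw
      simp only [pvPass, h, if_false] at hsw ⊢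
      rw [pvPass_id (b :: t) hsw]
termination_by xs => xs.length

theorem pvPass_sorted : ∀ xs : List Char, (pvPass xs).2 = false →
    xs.Pairwise (fun a b => b ≤ a)
  | [] => by simp
  | [a] => by simp
  | a :: b :: t => by
    by_cases h : a < b
    · simp [pvPass, h]
    · intro hsw
      simp only [pvPass, h, if_false] at hsw
      have hp := pvPass_sorted (b :: t) hsw
      rcases List.pairwise_cons.mp hp with ⟨hb, _⟩
      refine List.pairwise_cons.mpr ⟨?_, hp⟩
      intro x hx
      rcases List.mem_cons.mp hx with rfl | hx
      · exact not_lt.mp h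
      · exact (hb x hx).trans (not_lt.mp h)
termination_by xs => xs.length

theorem pvBubble_perm : ∀ xs : List Char, (pvBubble xs).Perm xs
  | xs => by
    rw [pvBubble]
    split
    · exact (pvBubble_perm _).trans (pvPass_perm xs)
    · exact pvPass_perm xs
termination_by xs => pvInv xs
decreasing_by exact pvPass_dec xs (by assumption)

theorem pvBubble_pairwise : ∀ xs : List Char, (pvBubble xs).Pairwise (fun a b => b ≤ a)
  | xs => by
    rw [pvBubble]
    split
    · exact pvBubble_pairwise _
    · rename_i h
      have hf : (pvPass xs).2 = false := by simpa using h
      rw [pvPass_id xs hf]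
      exact pvPass_sorted xs hf
termination_by xs => pvInv xs
decreasing_by exact pvPass_dec xs (by assumption)

-- A's bubble loop on a duplicate-free list is exactly sorted(xs, reverse=True)
theorem pvBubble_eq_sorted (xs : List Char) (h : xs.Nodup) :
    PySem.List.sorted xs (fun x => x) true = pvBubble xs := by
  apply PySem.List.sorted_rev_eq_of_perm_of_pairwise_gt _ _ _ (pvBubble_perm xs)
  have h2 : (pvBubble xs).Pairwise (· ≠ ·) := ((pvBubble_perm xs).nodup_iff.mpr h)
  exact ((pvBubble_pairwise xs).and h2).imp
    (fun hx => lt_of_le_of_ne hx.1 hx.2.symm)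

theorem portA_eq (studentsArr : List String) :
    initialGroupingDescending studentsArr =
      (pvBubble (PySem.Set.ofList (studentsArr.map pvFirst))).map
        (fun h => String.ofList [h] :: studentsArr.filter (fun s => h == pvFirst s)) := by
  unfold initialGroupingDescending
  simp only [PySem.List.foldl_append_singleton_eq_map, PySem.List.foldl_append_if,
    List.nil_append, List.singleton_append]
  simp

theorem portB_eq (studentsArr : List String) :
    initialGroupingDescending_alt studentsArr =
      (PySem.List.sorted (PySem.Set.ofList (studentsArr.map pvFirst)) (fun x => x) true).map
        (fun k => String.ofList [k] :: studentsArr.filter (fun s => pvFirst s == k)) := by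
  unfold initialGroupingDescending_alt
  have hfold : studentsArr.foldl
      (fun d s => d.modify (pvFirst s) [] (fun g => g ++ [s])) PySem.Dict.empty
    = (studentsArr.map (fun s => (pvFirst s, s))).foldl
      (fun d p => d.modify p.1 [] (fun g => g ++ [p.2])) PySem.Dict.empty := by
    rw [List.foldl_map]
  rw [hfold]
  simp only [PySem.Dict.keys_foldl_modify_key ((studentsArr.map (fun s => (pvFirst s, s)))) Prod.fst,
    PySem.Dict.getD_foldl_modify_append, PySem.Dict.keys_empty, PySem.Set.update_nil_left,
    List.map_map, List.filter_map, List.singleton_append]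
  simp [Function.comp_def, PySem.Dict.getD_empty]

-- ===== VERDICT (by name: the statement is the Claim_ definition above) =====
theorem initialGroupingDescending_spec : Claim_equal_initialGroupingDescending := by
  intro studentsArr _ _
  unfold Spec_initialGroupingDescending
  rw [portA_eq, portB_eq,
      pvBubble_eq_sorted _ (PySem.Set.nodup_ofList _)]
  exact List.map_congr_left (fun h _ => by
    simp only [Bool.beq_comm])
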